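-- pv_equiv track=rewrite | github.com/pdmahon1/Personal_Projects | Crypto/Python_files/lfsr.py | find_plaintext
-- ===== SOURCE A (Python) =====
-- def xor(left, right):
--     lfsr = "" #lfsr = left XOR right (up to smallest string length)
--     smaller = min(len(left), len(right))
--
--     for i in range(0, smaller):
--         #convert the bits from string to integer
--         pt_bit = int(left[i])
--         ci_bit = int(right[i])
--
--         #creates the XOR comparisons to construct the LFSR
--         XOR_1 = (not pt_bit) == ci_bit
--         XOR_2 = (not ci_bit) == pt_bit
--         if(XOR_1 or XOR_2):   # XOR = (~AB and ~BA)
--             lfsr += "1"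
--         else:
--             lfsr += "0"
--
--     return lfsr
--
-- def find_plaintext(ciphertext, lfsr):
--
--     #the loop constructs the LFSR (mod 2) over the entire
--     #length of the ciphertext
--     start = len(lfsr)
--     end = len(ciphertext)
--     for i in range(start, end):
--         x_n0 = int(lfsr[i-5])
--         x_n1 = int(lfsr[i-4])
--         x_n4 = int(lfsr[i-1])
--         lfsr += str((x_n0 + x_n1 + x_n4) % 2)
--
--     return xor(lfsr, ciphertext)
-- ===== SOURCE B (Python) =====
-- def find_plaintext(ciphertext, lfsr):
--     # Single fused pass: grow the keystream lazily and XOR each bit immediately.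
--     key = list(lfsr)
--     out = []
--     for i in range(len(ciphertext)):
--         if i >= len(key):
--             key.append(str((int(key[i - 5]) + int(key[i - 4]) + int(key[i - 1])) % 2))
--         k = int(key[i])
--         c = int(ciphertext[i])
--         out.append("1" if (not k) == c or (not c) == k else "0")
--     return "".join(out)
-- ===== Notes on version B (the rewrite author's own statement) =====
-- stated objective: alternative
-- what changed: B replaces A's two sequential phases (extend the LFSR string to the ciphertext length, then the xor helper's second pass with min-length logic) by a single fused pass over the ciphertext indices that grows the keystream list lazily and emits each XOR bit immediately, joining a list at the end instead of repeated string concatenation.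
import Mathlib
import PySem

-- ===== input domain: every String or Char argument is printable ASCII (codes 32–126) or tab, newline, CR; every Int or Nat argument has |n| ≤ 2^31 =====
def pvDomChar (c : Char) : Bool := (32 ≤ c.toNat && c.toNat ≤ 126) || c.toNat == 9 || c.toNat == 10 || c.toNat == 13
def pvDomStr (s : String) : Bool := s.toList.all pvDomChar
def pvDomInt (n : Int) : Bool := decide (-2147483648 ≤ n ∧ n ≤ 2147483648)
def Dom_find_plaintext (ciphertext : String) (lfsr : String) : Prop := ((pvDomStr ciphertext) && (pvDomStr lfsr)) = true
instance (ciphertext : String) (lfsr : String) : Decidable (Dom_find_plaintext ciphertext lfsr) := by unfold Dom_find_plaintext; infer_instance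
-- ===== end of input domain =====

-- B fuses A's two phases (extend the LFSR string, then XOR it with the ciphertext)
-- into one pass that grows the keystream lazily and XORs each bit immediately
-- (objective: alternative decomposition, same cost).

-- ===== PORT A =====
-- int(c) on a single digit character (exact for '0'..'9'; Pre_ excludes non-digit
-- reads, where Python raises ValueError)
def pvDigit (c : Char) : Int := (c.toNat : Int) - 48

-- the helper `xor(left, right)` of A, literally: Python's bool==int comparisons
def pvXorA (left : List Char) (right : List Char) : List Char :=
  (List.range (min left.length right.length)).foldl (fun acc i =>
    let pt := pvDigit (left.getD i ' ')
    let ci := pvDigit (right.getD i ' ')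
    let xor1 := (if pt == 0 then (1 : Int) else 0) == ci   -- (not pt_bit) == ci_bit
    let xor2 := (if ci == 0 then (1 : Int) else 0) == pt   -- (not ci_bit) == pt_bit
    acc ++ [if xor1 || xor2 then '1' else '0']) []

-- one iteration of A's extension loop: lfsr += str((lfsr[i-5]+lfsr[i-4]+lfsr[i-1]) % 2)
-- (Python negative indices wrap: pyGetD; the default ' ' is never read under Pre_)
def pvExtStep (cur : List Char) (i : Int) : List Char :=
  let x0 := pvDigit (PySem.List.pyGetD cur (i - 5) ' ')
  let x1 := pvDigit (PySem.List.pyGetD cur (i - 4) ' ')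
  let x4 := pvDigit (PySem.List.pyGetD cur (i - 1) ' ')
  cur ++ [if PySem.Int.mod (x0 + x1 + x4) 2 == 1 then '1' else '0']

def find_plaintext (ciphertext : String) (lfsr : String) : String :=
  let ct := ciphertext.toList
  let lf := lfsr.toList
  let ext := (PySem.List.pyRange (lf.length : Int) (ct.length : Int) 1).foldl pvExtStep lf
  String.ofList (pvXorA ext ct)

-- ===== PORT B =====
-- the body of B's single loop: lazily grow the keystream, then XOR at position i
def pvAltStep (ct : List Char) (st : List Char × List Char) (i : Nat) : List Char × List Char :=
  let key := st.1
  let key := if decide (key.length ≤ i) then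
      key ++ [if PySem.Int.mod
          (pvDigit (PySem.List.pyGetD key ((i : Int) - 5) ' ')
           + pvDigit (PySem.List.pyGetD key ((i : Int) - 4) ' ')
           + pvDigit (PySem.List.pyGetD key ((i : Int) - 1) ' ')) 2 == 1 then '1' else '0']
    else key
  let k := pvDigit (key.getD i ' ')
  let c := pvDigit (ct.getD i ' ')
  (key, st.2 ++ [if ((if k == 0 then (1 : Int) else 0) == c)
                 || ((if c == 0 then (1 : Int) else 0) == k) then '1' else '0'])

def find_plaintext_alt (ciphertext : String) (lfsr : String) : String :=
  let ct := ciphertext.toList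
  String.ofList (((List.range ct.length).foldl (pvAltStep ct) (lfsr.toList, [])).2)

-- ===== PRECONDITION & SPEC =====
-- Pre_ excludes exactly the inputs where A raises: a non-digit character at a read
-- position (int() ValueError) and len(lfsr) < 3 with len(ciphertext) > len(lfsr)
-- (the extension loop's negative wrapped index falls out of range: IndexError).
def pvIsDigit (c : Char) : Bool := 48 ≤ c.toNat && c.toNat ≤ 57
def Pre_find_plaintext (ciphertext : String) (lfsr : String) : Prop :=
  ciphertext.toList.all pvIsDigit = true ∧
  (lfsr.toList.take (min lfsr.toList.length ciphertext.toList.length)).all pvIsDigit = true ∧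
  (ciphertext.toList.length ≤ lfsr.toList.length ∨ 3 ≤ lfsr.toList.length)
instance (ciphertext : String) (lfsr : String) : Decidable (Pre_find_plaintext ciphertext lfsr) := by
  unfold Pre_find_plaintext; infer_instance

def pvWitness_find_plaintext : String × String := ("101", "110")

def Spec_find_plaintext (ciphertext : String) (lfsr : String) (out : String) : Prop := out = find_plaintext_alt ciphertext lfsr
instance (ciphertext : String) (lfsr : String) (out : String) : Decidable (Spec_find_plaintext ciphertext lfsr out) := by unfold Spec_find_plaintext; infer_instance

-- ===== CLAIM (what is proved, stated in full; the proofs are below) =====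
def Claim_equal_find_plaintext : Prop := ∀ (ciphertext : String) (lfsr : String), Dom_find_plaintext ciphertext lfsr → Pre_find_plaintext ciphertext lfsr → Spec_find_plaintext ciphertext lfsr (find_plaintext ciphertext lfsr)

-- ===== LEMMAS AND PROOFS =====

-- the XOR output bit for key char a and ciphertext char b
def pvBit (a b : Char) : Char :=
  if ((if pvDigit a == 0 then (1 : Int) else 0) == pvDigit b)
     || ((if pvDigit b == 0 then (1 : Int) else 0) == pvDigit a) then '1' else '0'

-- the extension fold: its result extends `cur`, has the expected length, and each
-- appended position n is pvExtStep of the prefix before it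
theorem pvExt_spec (m : Nat) : ∀ (cur : List Char),
    cur <+: (PySem.List.pyRange (cur.length : Int) ((cur.length + m : Nat) : Int) 1).foldl pvExtStep cur ∧
    ((PySem.List.pyRange (cur.length : Int) ((cur.length + m : Nat) : Int) 1).foldl pvExtStep cur).length = cur.length + m ∧
    ∀ n : Nat, cur.length ≤ n → n < cur.length + m →
      ((PySem.List.pyRange (cur.length : Int) ((cur.length + m : Nat) : Int) 1).foldl pvExtStep cur).take (n + 1)
        = pvExtStep (((PySem.List.pyRange (cur.length : Int) ((cur.length + m : Nat) : Int) 1).foldl pvExtStep cur).take n) (n : Int) := by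
  induction m with
  | zero =>
    intro cur
    rw [PySem.List.pyRange_one_eq_nil (by omega)]
    refine ⟨List.prefix_refl _, by simp, ?_⟩
    intro n h1 h2; omega
  | succ m ih =>
    intro cur
    have hlt : (cur.length : Int) < ((cur.length + (m+1) : Nat) : Int) := by push_cast; omega
    rw [PySem.List.pyRange_one_cons hlt, List.foldl_cons]
    set cur' := pvExtStep cur (cur.length : Int) with hcur'
    have hlen' : cur'.length = cur.length + 1 := by
      simp [hcur', pvExtStep]
    have hrange : PySem.List.pyRange ((cur.length : Int) + 1) ((cur.length + (m+1) : Nat) : Int) 1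
        = PySem.List.pyRange (cur'.length : Int) ((cur'.length + m : Nat) : Int) 1 := by
      rw [hlen']; congr 1; all_goals (push_cast; ring)
    rw [hrange]
    obtain ⟨hpre, hlen, hstep⟩ := ih cur'
    have hcc' : cur <+: cur' := ⟨_, rfl⟩
    refine ⟨hcc'.trans hpre, by omega, ?_⟩
    intro n h1 h2
    rcases Nat.eq_or_lt_of_le h1 with heq | hlt2
    · subst heq
      obtain ⟨t, ht⟩ := hpre
      rw [← ht]
      have h1' : cur'.take (cur.length + 1) = cur' := by
        rw [List.take_of_length_le (by omega)]
      rw [List.take_append_of_le_length (by omega), List.take_append_of_le_length (by omega), h1']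
      have htake : List.take cur.length cur' = cur := by
        rw [hcur']; simp [pvExtStep]
      rw [htake, hcur']
    · exact hstep n (by omega) (by omega)

-- getD through take
theorem pvGetD_take (E : List Char) (m n : Nat) (h : n < m) (d : Char) :
    (E.take m).getD n d = E.getD n d := by
  simp [List.getD_eq_getElem?_getD, h]

-- the core equivalence, at the level of char lists
theorem pv_core (c l : List Char) :
    ((List.range c.length).foldl (pvAltStep c) (l, [])).2
      = pvXorA ((PySem.List.pyRange (l.length : Int) (c.length : Int) 1).foldl pvExtStep l) c := by
  set E := (PySem.List.pyRange (l.length : Int) (c.length : Int) 1).foldl pvExtStep l with hE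
  set s := l.length with hs
  set e := c.length with he
  -- facts about E
  have hfacts : l <+: E ∧ E.length = max s e ∧
      ∀ n : Nat, s ≤ n → n < e → E.take (n + 1) = pvExtStep (E.take n) (n : Int) := by
    by_cases hse : s ≤ e
    · have hcast : (e : Int) = ((s + (e - s) : Nat) : Int) := by push_cast; omega
      rw [hE, hcast]
      obtain ⟨h1, h2, h3⟩ := pvExt_spec (e - s) l
      exact ⟨h1, by rw [h2]; omega, fun n hn1 hn2 => h3 n hn1 (by omega)⟩
    · rw [hE, PySem.List.pyRange_one_eq_nil (by omega), List.foldl_nil]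
      exact ⟨List.prefix_refl _, by omega, fun n hn1 hn2 => by omega⟩
  obtain ⟨hpre, hlenE, hstep⟩ := hfacts
  -- one step of B, written through pvExtStep and pvBit
  have hone : ∀ (n : Nat) (st : List Char × List Char),
      pvAltStep c st n =
        ((if decide (st.1.length ≤ n) then pvExtStep st.1 (n : Int) else st.1),
         st.2 ++ [pvBit ((if decide (st.1.length ≤ n) then pvExtStep st.1 (n : Int) else st.1).getD n ' ')
                        (c.getD n ' ')]) := by
    intro n st; rfl
  -- invariant of B's loop
  have hinv : ∀ n : Nat, n ≤ e → (List.range n).foldl (pvAltStep c) (l, []) =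
      (E.take (max s n), (List.range n).map (fun i => pvBit (E.getD i ' ') (c.getD i ' '))) := by
    intro n
    induction n with
    | zero =>
      intro _
      simp only [List.range_zero, List.foldl_nil, List.map_nil, Nat.max_zero]
      rw [(List.prefix_iff_eq_take.mp hpre).symm]
    | succ n ih =>
      intro hn1
      have hne : n < e := by omega
      rw [List.range_succ, List.foldl_append, List.foldl_cons, List.foldl_nil, ih (by omega),
          hone n]
      have hkeylen : (E.take (max s n)).length = max s n := by
        rw [List.length_take]; omega
      have hkey2 : (if decide ((E.take (max s n)).length ≤ n) then pvExtStep (E.take (max s n)) (n : Int)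
            else E.take (max s n)) = E.take (max s (n + 1)) := by
        by_cases hsn : s ≤ n
        · have hmax : max s n = n := by omega
          have hmax' : max s (n + 1) = n + 1 := by omega
          rw [hmax, hmax', if_pos (by rw [List.length_take]; simp only [decide_eq_true_eq]; omega), ← hstep n hsn hne]
        · have hmax : max s n = s := by omega
          have hmax' : max s (n + 1) = max s n := by omega
          rw [hmax', if_neg (by rw [hkeylen]; simp only [decide_eq_true_eq]; omega)]
      rw [hkey2]
      have hgd : (E.take (max s (n + 1))).getD n ' ' = E.getD n ' ' :=
        pvGetD_take E _ n (by omega) ' '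
      rw [hgd]; simp
  rw [hinv e (le_refl e)]
  have hmin : min E.length c.length = c.length := by rw [hlenE]; omega
  simp only [pvXorA, hmin]
  rw [PySem.List.foldl_append_singleton_eq_map, List.nil_append]
  rfl

theorem find_plaintext_spec : Claim_equal_find_plaintext := by
  intro ciphertext lfsr _ _
  show find_plaintext _ _ = find_plaintext_alt _ _
  unfold find_plaintext find_plaintext_alt
  exact congrArg String.ofList (pv_core ciphertext.toList lfsr.toList).symm
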